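-- pv_equiv track=rewrite | github.com/Ha-Young/algorithm_programmers | Python/Lv2/짝지어제거하기/solution.py | solution
-- ===== SOURCE A (Python) =====
-- from collections import deque
--
-- def solution(s):
--     stack = deque([])
--
--     for c in s:
--         stack.append(c)
--         if len(stack) >= 2 and stack[-1] == stack[-2]:
--             stack.pop()
--             stack.pop()
--
--     if stack:
--         return 0
--     else:
--         return 1
-- ===== SOURCE B (Python) =====
-- def solution(s):
--     changed = True
--     while changed:
--         changed = False
--         out = []
--         i = 0
--         while i < len(s):
--             if i + 1 < len(s) and s[i] == s[i + 1]:
--                 i += 2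
--                 changed = True
--             else:
--                 out.append(s[i])
--                 i += 1
--         s = ''.join(out)
--     return 1 if s == '' else 0
-- ===== Notes on version B (the rewrite author's own statement) =====
-- stated objective: alternative
-- what changed: Replaces the single stack pass with iterate-to-fixpoint: repeated flat left-to-right scans that each delete non-overlapping adjacent equal pairs, stopping when a pass removes nothing.
import Mathlib
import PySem

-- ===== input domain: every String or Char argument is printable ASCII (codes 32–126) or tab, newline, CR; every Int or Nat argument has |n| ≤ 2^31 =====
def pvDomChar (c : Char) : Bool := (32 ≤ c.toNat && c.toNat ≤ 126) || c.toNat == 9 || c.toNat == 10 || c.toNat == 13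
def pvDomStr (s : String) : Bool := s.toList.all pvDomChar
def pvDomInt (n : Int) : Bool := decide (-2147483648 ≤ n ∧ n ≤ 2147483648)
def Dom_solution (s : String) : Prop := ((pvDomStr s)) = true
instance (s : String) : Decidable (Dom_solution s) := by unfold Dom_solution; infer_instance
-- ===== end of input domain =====

-- B replaces A's single stack pass by iterate-to-fixpoint flat scans (alternative algorithm, not faster).

-- ===== PORT A =====
-- for c in s: stack.append(c); if len(stack)>=2 and stack[-1]==stack[-2]: pop twice; return 0 if stack else 1
def solution (s : String) : Int :=
  let stack := s.toList.foldl (fun stack c =>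
      let stack := stack ++ [c]
      if 2 ≤ stack.length ∧
          PySem.List.pyGet? stack (-1) = PySem.List.pyGet? stack (-2) then
        stack.dropLast.dropLast
      else stack) []
  if stack ≠ [] then 0 else 1

-- ===== PORT B =====
-- one flat left-to-right scan: skip a non-overlapping adjacent equal pair (changed := true),
-- otherwise keep the character
def passC : List Char → List Char × Bool
  | [] => ([], false)
  | [a] => ([a], false)
  | a :: b :: t =>
    if a = b then ((passC t).1, true)
    else
      let r := passC (b :: t)
      (a :: r.1, r.2)

theorem passC_le : ∀ l : List Char, (passC l).1.length ≤ l.length := by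
  intro l
  induction l using passC.induct with
  | case1 => simp [passC]
  | case2 a => simp [passC]
  | case3 b t ih => simp only [passC]; simp; omega
  | case4 a b t h ih => simp only [passC, if_neg h] at ih ⊢; simp at ih ⊢; omega

theorem passC_lt : ∀ l : List Char, (passC l).2 = true → (passC l).1.length < l.length := by
  intro l
  induction l using passC.induct with
  | case1 => simp [passC]
  | case2 a => simp [passC]
  | case3 b t ih =>
    intro _
    simp only [passC]
    have := passC_le t
    simp; omega
  | case4 a b t h ih =>
    intro hch
    simp only [passC, if_neg h] at hch ⊢
    have := ih hch
    simp at this ⊢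
    omega

-- while changed: one scan, replace s; stop when a pass removes nothing
def loopB (l : List Char) : List Char :=
  let r := passC l
  if h : r.2 = true then loopB r.1 else r.1
termination_by l.length
decreasing_by exact passC_lt l h

-- return 1 if the fully reduced string is empty else 0
def solution_alt (s : String) : Int :=
  let t := loopB s.toList
  if t = [] then 1 else 0

-- ===== PRECONDITION & SPEC =====
def Spec_solution (s : String) (out : Int) : Prop := out = solution_alt s
instance (s : String) (out : Int) : Decidable (Spec_solution s out) := by unfold Spec_solution; infer_instance

-- ===== CLAIM (what is proved, stated in full; the proofs are below) =====
def Claim_equal_solution : Prop := ∀ (s : String), Dom_solution s → Spec_solution s (solution s)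

-- ===== LEMMAS AND PROOFS =====

-- abstract cancellation step (stack with top at the head)
def pvStep (st : List Char) (c : Char) : List Char :=
  if st.head? = some c then st.tail else c :: st

theorem pvStep_chain {st : List Char} (c : Char) (h : List.IsChain (· ≠ ·) st) :
    List.IsChain (· ≠ ·) (pvStep st c) := by
  unfold pvStep
  split_ifs with hc
  · exact h.tail
  · exact List.isChain_cons.2 ⟨fun b hb => by
      intro he; subst he; exact hc (by cases st <;> simp_all), h⟩

theorem pvStep_pvStep {st : List Char} (c : Char) (h : List.IsChain (· ≠ ·) st) :
    pvStep (pvStep st c) c = st := by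
  cases st with
  | nil => simp [pvStep]
  | cons d t =>
    by_cases hdc : d = c
    · subst hdc
      have hne : t.head? ≠ some d := by
        cases t with
        | nil => simp
        | cons e u =>
          simp only [List.head?_cons, ne_eq, Option.some.injEq]
          intro he
          exact ((List.isChain_cons.1 h).1 e (by simp)) he.symm
      simp [pvStep, hne]
    · simp [pvStep, hdc]

theorem pass_red (l : List Char) : ∀ st, List.IsChain (· ≠ ·) st →
    List.foldl pvStep st (passC l).1 = List.foldl pvStep st l := by
  induction l using passC.induct with
  | case1 => intro st _; simp [passC]
  | case2 a => intro st _; simp [passC]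
  | case3 b t ih =>
    intro st hst
    have e : passC (b :: b :: t) = ((passC t).1, true) := by simp [passC]
    rw [e, ih st hst]
    show List.foldl pvStep st t = List.foldl pvStep (pvStep (pvStep st b) b) t
    rw [pvStep_pvStep b hst]
  | case4 a b t h ih =>
    intro st hst
    simp only [passC, if_neg h, List.foldl_cons]
    exact ih (pvStep st a) (pvStep_chain a hst)

theorem pass_false_id : ∀ l : List Char, (passC l).2 = false → (passC l).1 = l := by
  intro l
  induction l using passC.induct with
  | case1 => simp [passC]
  | case2 a => simp [passC]
  | case3 b t ih => simp [passC]
  | case4 a b t h ih => intro hf; simp only [passC, if_neg h] at hf ⊢; rw [ih hf]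

theorem pass_false_chain : ∀ l : List Char, (passC l).2 = false → List.IsChain (· ≠ ·) l := by
  intro l
  induction l using passC.induct with
  | case1 => simp
  | case2 a => simp
  | case3 b t ih => simp [passC]
  | case4 a b t h ih =>
    intro hf
    simp only [passC, if_neg h] at hf
    exact List.isChain_cons.2 ⟨fun y hy => by
      cases t <;> simp_all, ih hf⟩

theorem loopB_red_aux : ∀ (n : Nat) (l : List Char), l.length ≤ n →
    (∀ st, List.IsChain (· ≠ ·) st →
      List.foldl pvStep st (loopB l) = List.foldl pvStep st l) ∧
    List.IsChain (· ≠ ·) (loopB l) := by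
  intro n
  induction n with
  | zero =>
    intro l hl
    have : l = [] := List.eq_nil_of_length_eq_zero (Nat.le_zero.1 hl)
    subst this
    rw [loopB]
    simp [passC]
  | succ n ih =>
    intro l hl
    rw [loopB]
    by_cases h : (passC l).2 = true
    · simp only [dif_pos h]
      have hlt := passC_lt l h
      have := ih (passC l).1 (by omega)
      refine ⟨fun st hst => ?_, this.2⟩
      rw [this.1 st hst, pass_red l st hst]
    · simp only [dif_neg h]
      rw [pass_false_id l (by simpa using h)]
      exact ⟨fun st _ => rfl, pass_false_chain l (by simpa using h)⟩

theorem fold_chain_eq : ∀ (l : List Char), List.IsChain (· ≠ ·) l → ∀ st,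
    List.IsChain (· ≠ ·) st → (∀ a, l.head? = some a → st.head? ≠ some a) →
    List.foldl pvStep st l = l.reverse ++ st := by
  intro l
  induction l with
  | nil => intro _ st _ _; simp
  | cons c t ih =>
    intro hl st hst hh
    have hne : st.head? ≠ some c := hh c (by simp)
    have hstep : pvStep st c = c :: st := by simp [pvStep, hne]
    rw [List.foldl_cons, hstep,
        ih (List.isChain_cons.1 hl).2 (c :: st)
          (List.isChain_cons.2 ⟨fun y hy => by
            intro he; subst he; exact hne (by cases st <;> simp_all), hst⟩)
          (fun a ha => by
            simp only [List.head?_cons, ne_eq, Option.some.injEq]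
            intro he
            exact (List.isChain_cons.1 hl).1 a ha (he ▸ rfl))]
    simp

-- A's per-step function equals the abstract step on the reversed stack
theorem stepA_eq (st : List Char) (c : Char) :
    (let stack := st ++ [c]
     if 2 ≤ stack.length ∧
         PySem.List.pyGet? stack (-1) = PySem.List.pyGet? stack (-2) then
       stack.dropLast.dropLast
     else stack) = (pvStep st.reverse c).reverse := by
  rcases List.eq_nil_or_concat st with h | ⟨init, d, h⟩
  · subst h; simp [pvStep, PySem.List.pyGet?]
  · rw [List.concat_eq_append] at h
    subst h
    have h1 : PySem.List.pyGet? (init ++ [d] ++ [c]) (-1) = some c := by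
      have := PySem.List.pyGet?_neg_one_append_singleton (init ++ [d]) c
      simpa using this
    have h2 : PySem.List.pyGet? (init ++ [d] ++ [c]) (-2) = some d := by
      rw [PySem.List.pyGet?_neg_ofNat _ 2 (by omega) (by simp)]
      have he : (init ++ [d] ++ [c]).length - 2 = init.length := by simp
      rw [he]
      have h3 : init ++ [d] ++ [c] = init ++ d :: [c] := by simp
      rw [h3, List.getElem?_append_right (by omega)]
      simp
    by_cases hcd : c = d
    · subst hcd
      rw [if_pos ⟨by simp, by rw [h1, h2]⟩]
      have hd1 : (init ++ [c] ++ [c]).dropLast = init ++ [c] := by simp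
      rw [hd1]
      simp [pvStep]
    · rw [if_neg (by rw [h1, h2]; simp [hcd])]
      simp [pvStep, Ne.symm hcd]

theorem foldA_eq : ∀ (l st : List Char),
    List.foldl (fun stack c =>
      let stack := stack ++ [c]
      if 2 ≤ stack.length ∧
          PySem.List.pyGet? stack (-1) = PySem.List.pyGet? stack (-2) then
        stack.dropLast.dropLast
      else stack) st l = (List.foldl pvStep st.reverse l).reverse := by
  intro l
  induction l with
  | nil => intro st; simp
  | cons c t ih =>
    intro st
    rw [List.foldl_cons, List.foldl_cons]
    have := stepA_eq st c
    simp only at this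
    rw [this, ih, List.reverse_reverse]

-- ===== VERDICT (by name: the statement is the Claim_ definition above) =====
theorem solution_spec : Claim_equal_solution := by
  intro s _
  unfold Spec_solution solution solution_alt
  simp only
  set l := s.toList with hl
  have hA := foldA_eq l []
  simp only [List.reverse_nil] at hA
  obtain ⟨hred, hchain⟩ := loopB_red_aux l.length l le_rfl
  have hfold : List.foldl pvStep [] (loopB l) = (loopB l).reverse := by
    rw [fold_chain_eq (loopB l) hchain [] (by simp) (by simp)]
    simp
  have key : List.foldl pvStep [] l = (loopB l).reverse := by
    rw [← hred [] (by simp), hfold]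
  rw [hA, key, List.reverse_reverse]
  by_cases ht : loopB l = [] <;> simp [ht]
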